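-- pv_equiv track=rewrite | github.com/balamuruganky/coderbyte_challenges | array.py | balance_weights
-- ===== SOURCE A (Python) =====
-- def is_balaceable(left: int, right: int, available1: int, available2: int) -> bool:
--     return ((left + available1) == (right + available2) or
--             (left + available2) == (right + available1) or
--             (left + available1 + available2) == (right) or
--             (left) == (right + available1 + available2))
--
-- def balance_weights(weighing_scale: list, available_weights: list) -> list:
--     left = weighing_scale[0]
--     right = weighing_scale[1]
--     # Check is one weight can balance the weighing scale
--     for weight in available_weights:
--         if is_balaceable(left, right, weight, 0):
--             return [weight]
--
--     # Check two available weights can balance the weighing scale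
--     for i in range(0, len(available_weights)):
--         for j in range(i+1, len(available_weights)):
--             if is_balaceable(left, right, available_weights[i], available_weights[j]):
--                 return [available_weights[i], available_weights[j]]
--
--     # If both the above cases are failed then return empty list
--     return []
-- ===== SOURCE B (Python) =====
-- def balance_weights(weighing_scale: list, available_weights: list) -> list:
--     left = weighing_scale[0]
--     right = weighing_scale[1]
--     d = right - left
--     # one weight balances iff it equals d or -d
--     for w in available_weights:
--         if w == d or w == -d:
--             return [w]
--     # single backward pass: first_at maps a value to its smallest index to the
--     # right of the current position; for each i pick the smallest such j among
--     # the four partner values, keeping the result for the smallest i.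
--     first_at = {}
--     best = None
--     for i in range(len(available_weights) - 1, -1, -1):
--         a = available_weights[i]
--         hit = None
--         for t in (a + d, a - d, d - a, -d - a):
--             k = first_at.get(t)
--             if k is not None and (hit is None or k < hit[0]):
--                 hit = (k, t)
--         if hit is not None:
--             best = [a, hit[1]]
--         first_at[a] = i
--     return best if best is not None else []
-- ===== Notes on version B (the rewrite author's own statement) =====
-- stated objective: alternative
-- what changed: Replaced the nested index-pair scan by a single backward pass that maintains a hash map from weight value to its smallest index to the right, picking each position's partner via four dictionary lookups.
import Mathlib
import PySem

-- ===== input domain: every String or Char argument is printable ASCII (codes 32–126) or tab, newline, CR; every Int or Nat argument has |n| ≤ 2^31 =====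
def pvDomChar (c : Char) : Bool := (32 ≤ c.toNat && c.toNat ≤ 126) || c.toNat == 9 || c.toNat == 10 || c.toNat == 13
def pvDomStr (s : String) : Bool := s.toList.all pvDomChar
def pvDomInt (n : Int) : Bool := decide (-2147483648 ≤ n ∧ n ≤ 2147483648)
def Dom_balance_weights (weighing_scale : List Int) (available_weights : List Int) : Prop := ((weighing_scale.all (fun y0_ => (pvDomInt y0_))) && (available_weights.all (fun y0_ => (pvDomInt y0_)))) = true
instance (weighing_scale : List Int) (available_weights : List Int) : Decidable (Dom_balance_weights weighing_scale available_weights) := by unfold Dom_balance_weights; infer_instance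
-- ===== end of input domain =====

-- B replaces A's nested index-pair scan by one backward pass with a hash map
-- (value -> smallest index to its right), finding the same first balancing pair.

-- ===== PORT A =====
def is_balaceable (left right available1 available2 : Int) : Bool :=
  (left + available1 == right + available2) ||
  (left + available2 == right + available1) ||
  (left + available1 + available2 == right) ||
  (left == right + available1 + available2)

-- first loop of A: first single weight that balances
def aFindOne (l r : Int) : List Int → Option Int
  | [] => none
  | w :: ws => if is_balaceable l r w 0 then some w else aFindOne l r ws

-- inner loop of A: first later weight pairing with `a`
def aInner (l r a : Int) : List Int → Option Int
  | [] => none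
  | b :: bs => if is_balaceable l r a b then some b else aInner l r a bs

-- nested index loops of A, written over the suffixes the indices denote
def aOuter (l r : Int) : List Int → List Int
  | [] => []
  | a :: rest =>
    match aInner l r a rest with
    | some b => [a, b]
    | none => aOuter l r rest

def balance_weights (weighing_scale : List Int) (available_weights : List Int) : List Int :=
  match weighing_scale with
  | l :: r :: _ =>
    (match aFindOne l r available_weights with
     | some w => [w]
     | none => aOuter l r available_weights)
  | _ => []  -- weighing_scale[0]/[1]: IndexError in Python; excluded by Pre_

-- ===== PORT B =====
-- first loop of B: single weight w balances iff w == d or w == -d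
def bFindOne (d : Int) : List Int → Option Int
  | [] => none
  | w :: ws => if w == d || w == -d then some w else bFindOne d ws

-- B's inner `for t in (a+d, a-d, d-a, -d-a)` step: keep the smallest index hit
def bStep (m : PySem.Dict Int Nat) (hit : Option (Nat × Int)) (t : Int) : Option (Nat × Int) :=
  match PySem.Dict.get? m t with
  | none => hit
  | some k =>
    match hit with
    | none => some (k, t)
    | some (j, _) => if k < j then some (k, t) else hit

-- B's backward index loop: processing position i after the whole suffix means
-- the dict holds, for each value, its smallest index > i; best is overwritten
-- whenever the (smaller) current i has a partner, so it ends at the first pair.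
def bGo (d : Int) (i : Nat) : List Int → PySem.Dict Int Nat × Option (List Int)
  | [] => (PySem.Dict.empty, none)
  | a :: rest =>
    let p := bGo d (i + 1) rest
    let hit := [a + d, a - d, d - a, -d - a].foldl (bStep p.1) none
    let best := match hit with
      | some (_, t) => some [a, t]
      | none => p.2
    (p.1.insert a i, best)

def balance_weights_alt (weighing_scale : List Int) (available_weights : List Int) : List Int :=
  match weighing_scale with
  | [] => []
  | l :: rest =>
    match rest with
    | [] => []
    | r :: _ =>
      let d := r - l
      (bFindOne d available_weights).elim (((bGo d 0 available_weights).2).getD [])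
        (fun w => [w])

-- ===== PRECONDITION & SPEC =====
-- Pre_ excludes only weighing scales with fewer than two pans, on which Python A
-- raises IndexError at weighing_scale[0]/weighing_scale[1].
def Pre_balance_weights (weighing_scale : List Int) (available_weights : List Int) : Prop :=
  2 ≤ weighing_scale.length
instance (weighing_scale : List Int) (available_weights : List Int) : Decidable (Pre_balance_weights weighing_scale available_weights) := by unfold Pre_balance_weights; infer_instance

def pvWitness_balance_weights : List Int × List Int := ([3, 4], [1, 2, 7, 7])

def Spec_balance_weights (weighing_scale : List Int) (available_weights : List Int) (out : List Int) : Prop := out = balance_weights_alt weighing_scale available_weights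
instance (weighing_scale : List Int) (available_weights : List Int) (out : List Int) : Decidable (Spec_balance_weights weighing_scale available_weights out) := by unfold Spec_balance_weights; infer_instance

-- ===== CLAIM (what is proved, stated in full; the proofs are below) =====
def Claim_equal_balance_weights : Prop := ∀ (weighing_scale : List Int) (available_weights : List Int), Dom_balance_weights weighing_scale available_weights → Pre_balance_weights weighing_scale available_weights → Spec_balance_weights weighing_scale available_weights (balance_weights weighing_scale available_weights)

-- ===== LEMMAS AND PROOFS =====

-- single-weight condition: is_balaceable(l, r, w, 0) says w = r-l or w = -(r-l)
lemma cond1_eq (l r w : Int) :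
    is_balaceable l r w 0 = (w == (r - l) || w == -(r - l)) := by
  rw [Bool.eq_iff_iff]; simp [is_balaceable]; omega

-- pair condition: is_balaceable(l, r, a, b) says b is one of the 4 targets
lemma cond2_iff (l r a b : Int) :
    (is_balaceable l r a b = true) ↔
      (b = a + (r - l) ∨ b = a - (r - l) ∨ b = (r - l) - a ∨ b = -(r - l) - a) := by
  simp [is_balaceable]; omega

lemma findOne_eq (l r : Int) : ∀ xs : List Int, bFindOne (r - l) xs = aFindOne l r xs := by
  intro xs
  induction xs with
  | nil => rfl
  | cons w ws ih => simp only [bFindOne, aFindOne, cond1_eq, ih]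

-- index of the first occurrence of v in a list
def fidx (v : Int) : List Int → Option Nat
  | [] => none
  | x :: xs => if x = v then some 0 else (fidx v xs).map (· + 1)

-- the dict built by bGo maps each value to its first index in the suffix, offset by i
lemma bGo_get? (d : Int) : ∀ (xs : List Int) (i : Nat) (v : Int),
    ((bGo d i xs).1).get? v = (fidx v xs).map (· + i) := by
  intro xs
  induction xs with
  | nil => intro i v; simp [bGo, fidx, PySem.Dict.get?_empty]
  | cons a rest ih =>
    intro i v
    simp only [bGo, fidx]
    rw [PySem.Dict.get?_insert]
    by_cases h : v = a
    · subst h; simp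
    · have h' : ¬ a = v := fun hh => h hh.symm
      rw [if_neg h, if_neg h', ih (i + 1) v]
      cases fidx v rest with
      | none => simp
      | some k => simp; omega

-- bStep characterized by the dict lookup
lemma bStep_of_none (m : PySem.Dict Int Nat) (hit : Option (Nat × Int)) (t : Int)
    (h : m.get? t = none) : bStep m hit t = hit := by
  simp [bStep, h]

lemma bStep_none_of_some (m : PySem.Dict Int Nat) (t : Int) (k : Nat)
    (h : m.get? t = some k) : bStep m none t = some (k, t) := by
  simp [bStep, h]

lemma bStep_some_of_some (m : PySem.Dict Int Nat) (t : Int) (k j : Nat) (x : Int)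
    (h : m.get? t = some k) :
    bStep m (some (j, x)) t = if k < j then some (k, t) else some (j, x) := by
  simp [bStep, h]

-- once the minimal hit (i, b) is the accumulator, the fold keeps it
lemma fold_keep (m : PySem.Dict Int Nat) (i : Nat) (b : Int)
    (H : ∀ t k, m.get? t = some k → i ≤ k) :
    ∀ ts : List Int, ts.foldl (bStep m) (some (i, b)) = some (i, b) := by
  intro ts
  induction ts with
  | nil => rfl
  | cons t0 ts' ih =>
    rw [List.foldl_cons]
    cases hg : m.get? t0 with
    | none => rw [bStep_of_none m _ t0 hg]; exact ih
    | some k =>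
      have hik : i ≤ k := H t0 k hg
      have hnk : ¬ k < i := by omega
      rw [bStep_some_of_some m t0 k i b hg, if_neg hnk]
      exact ih

-- if b is among the targets, m maps b to i and everything else strictly later,
-- the fold returns (i, b)
lemma fold_hit (m : PySem.Dict Int Nat) (i : Nat) (b : Int)
    (Hb : m.get? b = some i)
    (H : ∀ t k, m.get? t = some k → t ≠ b → i < k) :
    ∀ (ts : List Int) (acc : Option (Nat × Int)),
      b ∈ ts →
      (acc = none ∨ ∃ j t, acc = some (j, t) ∧ m.get? t = some j) →
      ts.foldl (bStep m) acc = some (i, b) := by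
  have Hge : ∀ t k, m.get? t = some k → i ≤ k := by
    intro t k hk
    by_cases ht : t = b
    · subst ht
      rw [Hb] at hk
      injection hk with h
      omega
    · exact le_of_lt (H t k hk ht)
  intro ts
  induction ts with
  | nil => intro acc hmem _; cases hmem
  | cons t0 ts' ih =>
    intro acc hmem hinv
    rw [List.foldl_cons]
    by_cases hb' : b ∈ ts'
    · apply ih _ hb'
      cases hg : m.get? t0 with
      | none => rw [bStep_of_none m acc t0 hg]; exact hinv
      | some k =>
        rcases hinv with rfl | ⟨j, t, rfl, hjt⟩
        · rw [bStep_none_of_some m t0 k hg]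
          exact Or.inr ⟨k, t0, rfl, hg⟩
        · rw [bStep_some_of_some m t0 k j t hg]
          by_cases hk : k < j
          · rw [if_pos hk]; exact Or.inr ⟨k, t0, rfl, hg⟩
          · rw [if_neg hk]; exact Or.inr ⟨j, t, rfl, hjt⟩
    · have ht0 : t0 = b := by
        rcases List.mem_cons.mp hmem with h | h
        · exact h.symm
        · exact absurd h hb'
      rw [ht0]
      have hstep : bStep m acc b = some (i, b) := by
        rcases hinv with rfl | ⟨j, t, rfl, hjt⟩
        · exact bStep_none_of_some m b i Hb
        · rw [bStep_some_of_some m b i j t Hb]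
          by_cases htb : t = b
          · rw [htb, Hb] at hjt
            have hj : j = i := by injection hjt with h; omega
            have hni : ¬ i < j := by omega
            rw [if_neg hni, hj, htb]
          · have hij : i < j := H t j hjt htb
            rw [if_pos hij]
      rw [hstep]
      exact fold_keep m i b Hge ts'

-- the hit of bGo's head step computes exactly A's inner scan (as a value)
lemma hit_eq (l r a : Int) : ∀ (xs : List Int) (i : Nat),
    ([a + (r - l), a - (r - l), (r - l) - a, -(r - l) - a].foldl
        (bStep ((bGo (r - l) i xs).1)) none).map Prod.snd
      = aInner l r a xs := by
  intro xs
  induction xs with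
  | nil =>
    intro i
    simp [bGo, bStep, PySem.Dict.get?_empty, aInner, List.foldl]
  | cons b bs ih =>
    intro i
    by_cases hc : is_balaceable l r a b = true
    · -- b is a target: the fold returns (i, b), A's scan returns b
      have hmem : b ∈ [a + (r - l), a - (r - l), (r - l) - a, -(r - l) - a] := by
        rcases (cond2_iff l r a b).mp hc with h | h | h | h <;> simp [h]
      have Hb : ((bGo (r - l) i (b :: bs)).1).get? b = some i := by
        rw [bGo_get?]; simp [fidx]
      have H : ∀ t k, ((bGo (r - l) i (b :: bs)).1).get? t = some k → t ≠ b → i < k := by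
        intro t k hk htb
        rw [bGo_get?] at hk
        simp only [fidx] at hk
        rw [if_neg (fun h => htb h.symm)] at hk
        cases hf : fidx t bs with
        | none => rw [hf] at hk; simp at hk
        | some k' => rw [hf] at hk; simp at hk; omega
      have := fold_hit _ i b Hb H
        [a + (r - l), a - (r - l), (r - l) - a, -(r - l) - a] none hmem (Or.inl rfl)
      -- the dict of (b :: bs) at base i is the one bGo's head step uses
      simp only [bGo] at this ⊢
      rw [this]
      simp [aInner, hc]
    · -- b is no target: the insert of b changes no target lookup
      have hne : ∀ t ∈ [a + (r - l), a - (r - l), (r - l) - a, -(r - l) - a], t ≠ b := by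
        intro t ht hteq
        exact hc ((cond2_iff l r a b).mpr (by subst hteq; simpa using ht))
      have hlook : ∀ t ∈ [a + (r - l), a - (r - l), (r - l) - a, -(r - l) - a],
          ((bGo (r - l) i (b :: bs)).1).get? t = ((bGo (r - l) (i + 1) bs).1).get? t := by
        intro t ht
        simp only [bGo]
        rw [PySem.Dict.get?_insert, if_neg (hne t ht)]
      -- rewrite the four lookups one by one
      simp only [List.foldl, bStep]
      rw [hlook _ (by simp), hlook _ (by simp), hlook _ (by simp), hlook _ (by simp)]
      have := ih (i + 1)
      simp only [List.foldl, bStep] at this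
      rw [this]
      simp [aInner, hc]

-- B's backward pass computes A's nested index loops
lemma pair_eq (l r : Int) : ∀ (xs : List Int) (i : Nat),
    (match (bGo (r - l) i xs).2 with
     | some p => p
     | none => ([] : List Int)) = aOuter l r xs := by
  intro xs
  induction xs with
  | nil => intro i; rfl
  | cons a rest ih =>
    intro i
    simp only [bGo, aOuter]
    have h := hit_eq l r a rest (i + 1)
    cases hin : aInner l r a rest with
    | some b =>
      rw [hin] at h
      cases hfold : ([a + (r - l), a - (r - l), (r - l) - a, -(r - l) - a].foldl
          (bStep ((bGo (r - l) (i + 1) rest).1)) none) with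
      | none => rw [hfold] at h; simp at h
      | some jt =>
        rw [hfold] at h
        have : jt.2 = b := by simpa using h
        simp [this]
    | none =>
      rw [hin] at h
      cases hfold : ([a + (r - l), a - (r - l), (r - l) - a, -(r - l) - a].foldl
          (bStep ((bGo (r - l) (i + 1) rest).1)) none) with
      | none => exact ih (i + 1)
      | some jt => rw [hfold] at h; simp at h

-- ===== VERDICT (by name: the statement is the Claim_ definition above) =====
theorem balance_weights_spec : Claim_equal_balance_weights := by
  unfold Claim_equal_balance_weights
  intro ws av _ hpre
  unfold Spec_balance_weights
  match ws with
  | l :: r :: _ =>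
    simp only [balance_weights, balance_weights_alt]
    rw [findOne_eq l r av]
    cases aFindOne l r av with
    | some w => rfl
    | none =>
      show aOuter l r av = ((bGo (r - l) 0 av).2).getD []
      rw [← pair_eq l r av 0]
      cases (bGo (r - l) 0 av).2 <;> rfl
  | [] => exact absurd hpre (by simp [Pre_balance_weights])
  | [_] => exact absurd hpre (by simp [Pre_balance_weights])
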